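-- pv_equiv track=rewrite | github.com/StevenLi-phoenix/flaskCurriculum | app.py | getTodaySchduel
-- ===== SOURCE A (Python) =====
-- order = ["P1", "P2", "Break", "P3", "P4", "P5", "Launch", "launch period", "P6", "P7", "P8", "P9", "P10"]
--
-- def getTodaySchduel(sch):
--     start, end = None, None
--     for period in order:
--         p = sch.get(period)
--         if p:
--             start = period
--             break
--     for period in order[::-1]:
--         p = sch.get(period)
--         if p:
--             end = period
--             break
--     return start, end
-- ===== SOURCE B (Python) =====
-- order = ["P1", "P2", "Break", "P3", "P4", "P5", "Launch", "launch period", "P6", "P7", "P8", "P9", "P10"]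
--
-- def getTodaySchduel(sch):
--     start = None
--     end = None
--     for period in order:
--         if sch.get(period):
--             if start is None:
--                 start = period
--             end = period
--     return start, end
-- ===== Notes on version B (the rewrite author's own statement) =====
-- stated objective: simpler
-- what changed: Replaces A's two opposite-direction break-loops (forward for start, reversed for end) with one forward pass that sets start once and overwrites end on every truthy period.
import Mathlib
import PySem

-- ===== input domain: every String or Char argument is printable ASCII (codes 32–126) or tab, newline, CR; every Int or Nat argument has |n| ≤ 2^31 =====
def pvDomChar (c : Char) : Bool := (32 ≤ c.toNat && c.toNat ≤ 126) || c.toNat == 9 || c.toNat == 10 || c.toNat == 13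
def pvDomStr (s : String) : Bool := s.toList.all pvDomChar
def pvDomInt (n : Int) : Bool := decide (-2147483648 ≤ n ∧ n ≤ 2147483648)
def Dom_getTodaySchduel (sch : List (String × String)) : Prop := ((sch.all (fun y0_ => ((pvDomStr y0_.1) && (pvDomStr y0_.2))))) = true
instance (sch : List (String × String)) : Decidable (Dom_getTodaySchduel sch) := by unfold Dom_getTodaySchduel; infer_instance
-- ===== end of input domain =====

-- B replaces A's two opposite-direction break-loops with one forward pass (start set once, end overwritten); same return value, objective: simpler.

-- the module-level constant `order`
def pvOrder : List String :=
  ["P1", "P2", "Break", "P3", "P4", "P5", "Launch", "launch period", "P6", "P7", "P8", "P9", "P10"]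

-- `sch.get(period)` followed by Python truthiness of the (string) value
def pvTruthy (sch : List (String × String)) (p : String) : Bool :=
  match (PySem.Dict.mk sch).get? p with
  | some s => !(s == "")
  | none => false

-- ===== PORT A =====
-- `for period in l: p = sch.get(period); if p: start = period; break`
def pvBreakLoopA (sch : List (String × String)) : List String → Option String
  | [] => none
  | p :: rest => if pvTruthy sch p then some p else pvBreakLoopA sch rest

def getTodaySchduel (sch : List (String × String)) : Option String × Option String :=
  -- first loop over order, second over order[::-1] (slice? … (-1), always `some` here)
  (pvBreakLoopA sch pvOrder,
   pvBreakLoopA sch ((PySem.List.slice? pvOrder none none (-1)).getD []))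

-- ===== PORT B =====
def pvStepB (sch : List (String × String)) (acc : Option String × Option String)
    (p : String) : Option String × Option String :=
  if pvTruthy sch p then
    ((match acc.1 with | none => some p | some x => some x), some p)
  else acc

def getTodaySchduel_alt (sch : List (String × String)) : Option String × Option String :=
  pvOrder.foldl (pvStepB sch) (none, none)

-- ===== PRECONDITION & SPEC =====
def Spec_getTodaySchduel (sch : List (String × String)) (out : Option String × Option String) : Prop := out = getTodaySchduel_alt sch
instance (sch : List (String × String)) (out : Option String × Option String) : Decidable (Spec_getTodaySchduel sch out) := by unfold Spec_getTodaySchduel; infer_instance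

-- ===== CLAIM (what is proved, stated in full; the proofs are below) =====
def Claim_equal_getTodaySchduel : Prop := ∀ (sch : List (String × String)), Dom_getTodaySchduel sch → Spec_getTodaySchduel sch (getTodaySchduel sch)

-- ===== LEMMAS AND PROOFS =====

-- last truthy element of a list, recursively
def pvFindLast (sch : List (String × String)) : List String → Option String
  | [] => none
  | p :: rest =>
    match pvFindLast sch rest with
    | some x => some x
    | none => if pvTruthy sch p then some p else none

theorem pvBreakLoopA_append (sch : List (String × String)) (a b : List String) :
    pvBreakLoopA sch (a ++ b) =
      match pvBreakLoopA sch a with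
      | some x => some x
      | none => pvBreakLoopA sch b := by
  induction a with
  | nil => simp [pvBreakLoopA]
  | cons p rest ih =>
    simp only [List.cons_append, pvBreakLoopA]
    by_cases h : pvTruthy sch p = true <;> simp [h, ih]

theorem pvBreakLoopA_reverse (sch : List (String × String)) (l : List String) :
    pvBreakLoopA sch l.reverse = pvFindLast sch l := by
  induction l with
  | nil => rfl
  | cons p rest ih =>
    simp only [List.reverse_cons, pvBreakLoopA_append, ih, pvFindLast, pvBreakLoopA]

theorem pvFoldB (sch : List (String × String)) (l : List String) :
    ∀ s e : Option String,
      l.foldl (pvStepB sch) (s, e) =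
        ((match s with | none => pvBreakLoopA sch l | some x => some x),
         (match pvFindLast sch l with | some x => some x | none => e)) := by
  induction l with
  | nil => intro s e; cases s <;> simp [pvBreakLoopA, pvFindLast]
  | cons p rest ih =>
    intro s e
    simp only [List.foldl_cons, pvStepB, pvBreakLoopA, pvFindLast]
    by_cases h : pvTruthy sch p = true
    · simp only [h, if_pos trivial, ih]
      cases s <;> cases hR : pvFindLast sch rest <;> simp
    · simp only [h, ih]
      cases hR : pvFindLast sch rest <;> simp

-- ===== VERDICT (by name: the statement is the Claim_ definition above) =====
theorem getTodaySchduel_spec : Claim_equal_getTodaySchduel := by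
  intro sch _
  show getTodaySchduel sch = getTodaySchduel_alt sch
  rw [getTodaySchduel, getTodaySchduel_alt, pvFoldB,
    show (PySem.List.slice? pvOrder none none (-1)).getD [] = pvOrder.reverse from by
      rw [PySem.List.slice?_none_none_neg_one]; rfl,
    pvBreakLoopA_reverse]
  cases pvFindLast sch pvOrder <;> rfl
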